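-- pv_equiv track=rewrite | github.com/zhuobinggang/honda | exp_model_for_news_emphasize.py | print_sentence
-- ===== SOURCE A (Python) =====
-- def token_transfer_by_emphasizes(tokens, emphasizes, i, last, then):
--     last_is_emphasize = emphasizes[last] if last > -1 else False
--     next_is_emphasize = emphasizes[then] if then < len(tokens) else False
--     current_is_emphasize = emphasizes[i]
--     if current_is_emphasize:
--         if not last_is_emphasize: # 唯一需要特殊对待的情况
--             # False True 的情况，增加左标记
--             tokens[i] = '【' + tokens[i]
--         if not next_is_emphasize:
--             # True False 的情况，增加右标记
--             tokens[i] = tokens[i] + '】'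
--
-- def print_sentence(tokens, emphasizes):
--     tokens = tokens.copy()
--     for i in range(len(tokens)):
--         last = i - 1
--         then = i + 1
--         token_transfer_by_emphasizes(tokens, emphasizes, i, last, then)
--     text = ''.join(tokens)
--     return text
-- ===== SOURCE B (Python) =====
-- def print_sentence(tokens, emphasizes):
--     # Build the table of maximal emphasized runs as (start, end) index pairs,
--     # then decorate the endpoints of each run and join.
--     n = len(tokens)
--     spans = []
--     start = None
--     for i in range(n):
--         if emphasizes[i]:
--             if start is None:
--                 start = i
--         else:
--             if start is not None:
--                 spans.append((start, i - 1))
--                 start = None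
--     if start is not None:
--         spans.append((start, n - 1))
--     out = list(tokens)
--     for s, e in spans:
--         out[s] = '【' + out[s]
--         out[e] = out[e] + '】'
--     return ''.join(out)
-- ===== Notes on version B (the rewrite author's own statement) =====
-- stated objective: alternative
-- what changed: B replaces A's per-token neighbour lookup (marking each token by inspecting emphasizes[i-1]/emphasizes[i+1]) with a two-phase span-table approach: one scan builds the list of maximal emphasized runs as (start,end) pairs, then only the run endpoints are decorated before joining.
import Mathlib
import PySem

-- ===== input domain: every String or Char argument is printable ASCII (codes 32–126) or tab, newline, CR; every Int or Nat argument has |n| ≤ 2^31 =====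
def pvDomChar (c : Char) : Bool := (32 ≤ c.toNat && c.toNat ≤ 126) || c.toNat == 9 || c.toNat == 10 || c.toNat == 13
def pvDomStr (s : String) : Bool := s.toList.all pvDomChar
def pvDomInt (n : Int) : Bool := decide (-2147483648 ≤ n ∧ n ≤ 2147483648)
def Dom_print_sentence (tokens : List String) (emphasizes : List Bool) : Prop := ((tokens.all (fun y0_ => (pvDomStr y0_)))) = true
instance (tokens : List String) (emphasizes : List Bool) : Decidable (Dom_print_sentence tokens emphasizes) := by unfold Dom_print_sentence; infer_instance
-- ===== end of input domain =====

-- B wraps maximal emphasized runs by building a span table and decorating run endpoints,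
-- instead of A's per-token neighbour lookup; alternative decomposition, same return value.
-- (A copies its list argument, so neither version mutates the caller's list.)

-- ===== PORT A =====
def token_transfer_by_emphasizes (tokens : List String) (emphasizes : List Bool)
    (i : Nat) (last : Int) (thn : Nat) : List String :=
  let last_is_emphasize : Bool :=
    if last > -1 then emphasizes.getD last.toNat false else false
  let next_is_emphasize : Bool :=
    if thn < tokens.length then emphasizes.getD thn false else false
  let current_is_emphasize : Bool := emphasizes.getD i false
  if current_is_emphasize then
    let t0 := tokens.getD i ""
    let t1 := if !last_is_emphasize then "【" ++ t0 else t0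
    let t2 := if !next_is_emphasize then t1 ++ "】" else t1
    tokens.set i t2
  else tokens

def print_sentence (tokens : List String) (emphasizes : List Bool) : String :=
  let ts := (List.range tokens.length).foldl
    (fun ts i => token_transfer_by_emphasizes ts emphasizes i ((i : Int) - 1) (i + 1)) tokens
  PySem.Str.join "" ts

-- ===== PORT B =====
-- one scan step of B: open / extend / close the current emphasized run
def pvScanStep (emphasizes : List Bool) (st : List (Nat × Nat) × Option Nat) (i : Nat) :
    List (Nat × Nat) × Option Nat :=
  if emphasizes.getD i false then
    match st.2 with
    | none => (st.1, some i)
    | some _ => st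
  else
    match st.2 with
    | some s => (st.1 ++ [(s, i - 1)], none)
    | none => st

-- decorate the endpoints of one span
def pvDecStep (out : List String) (se : Nat × Nat) : List String :=
  let out1 := out.set se.1 ("【" ++ out.getD se.1 "")
  out1.set se.2 (out1.getD se.2 "" ++ "】")

def print_sentence_alt (tokens : List String) (emphasizes : List Bool) : String :=
  let n := tokens.length
  let scan := (List.range n).foldl (pvScanStep emphasizes) ([], none)
  let spans := match scan.2 with
    | some s => scan.1 ++ [(s, n - 1)]
    | none => scan.1
  let out := spans.foldl pvDecStep tokens
  PySem.Str.join "" out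

-- ===== PRECONDITION & SPEC =====
-- Python A raises IndexError (emphasizes[i]) exactly when emphasizes is shorter than tokens.
def Pre_print_sentence (tokens : List String) (emphasizes : List Bool) : Prop :=
  tokens.length ≤ emphasizes.length
instance (tokens : List String) (emphasizes : List Bool) : Decidable (Pre_print_sentence tokens emphasizes) := by unfold Pre_print_sentence; infer_instance
def pvWitness_print_sentence : List String × List Bool := (["a", "b", "c"], [false, true, true])

def Spec_print_sentence (tokens : List String) (emphasizes : List Bool) (out : String) : Prop := out = print_sentence_alt tokens emphasizes
instance (tokens : List String) (emphasizes : List Bool) (out : String) : Decidable (Spec_print_sentence tokens emphasizes out) := by unfold Spec_print_sentence; infer_instance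

-- ===== CLAIM (what is proved, stated in full; the proofs are below) =====
def Claim_equal_print_sentence : Prop := ∀ (tokens : List String) (emphasizes : List Bool), Dom_print_sentence tokens emphasizes → Pre_print_sentence tokens emphasizes → Spec_print_sentence tokens emphasizes (print_sentence tokens emphasizes)

-- ===== LEMMAS AND PROOFS =====

-- the decorated form of token t at position j (n = number of tokens)
def pvDecoA (em : List Bool) (n j : Nat) (t : String) : String :=
  if em.getD j false = true then
    if ¬(j + 1 < n ∧ em.getD (j + 1) false = true) then
      (if ¬(0 < j ∧ em.getD (j - 1) false = true) then "【" ++ t else t) ++ "】"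
    else
      (if ¬(0 < j ∧ em.getD (j - 1) false = true) then "【" ++ t else t)
  else t

-- value of position j after B has scanned positions < k with open-run state st, over list out
def pvVal (em : List Bool) (n k : Nat) (st : Option Nat) (out : List String) (j : Nat) : String :=
  if j < k then
    if st ≠ none ∧ j + 1 = k ∧ (k = n ∨ em.getD k false = false) then
      (if st = some j then "【" ++ out.getD j "" else out.getD j "") ++ "】"
    else
      (if st = some j then "【" ++ out.getD j "" else out.getD j "")
  else
    if em.getD j false = true then
      if ¬(j + 1 < n ∧ em.getD (j + 1) false = true) then
        (if (j = k ∧ st = none) ∨ (j ≠ k ∧ ¬(0 < j ∧ em.getD (j - 1) false = true))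
          then "【" ++ out.getD j "" else out.getD j "") ++ "】"
      else
        (if (j = k ∧ st = none) ∨ (j ≠ k ∧ ¬(0 < j ∧ em.getD (j - 1) false = true))
          then "【" ++ out.getD j "" else out.getD j "")
    else out.getD j ""

lemma pv_getD_set (l : List String) (i j : Nat) (v : String) (hj : j < l.length) :
    (l.set i v).getD j "" = if i = j then v else l.getD j "" := by
  by_cases hi : i < l.length
  · rw [List.getD_eq_getElem _ _ (by simpa using hj), List.getElem_set,
      List.getD_eq_getElem _ _ hj]
  · rw [List.set_eq_of_length_le (by omega)]
    have : ¬ i = j := by omega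
    simp [this]

lemma pv_set_getD_self (l : List String) (j : Nat) (hj : j < l.length) :
    l.set j (l.getD j "") = l := by
  apply List.ext_getElem (by simp)
  intro i h1 h2
  rw [List.getElem_set]
  split_ifs with h
  · subst h; rw [List.getD_eq_getElem _ _ hj]
  · rfl

-- one A-step decorates position k in place
lemma pvA_step (em : List Bool) (ts : List String) (k : Nat) :
    token_transfer_by_emphasizes ts em k ((k : Int) - 1) (k + 1) =
      ts.set k (pvDecoA em ts.length k (ts.getD k "")) := by
  unfold token_transfer_by_emphasizes pvDecoA
  have hlast : (if ((k : Int) - 1) > -1 then em.getD ((k : Int) - 1).toNat false else false) =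
      decide (0 < k ∧ em.getD (k - 1) false = true) := by
    rcases Nat.eq_zero_or_pos k with h | h
    · subst h; simp
    · have h1 : ((k : Int) - 1) > -1 := by omega
      have h2 : ((k : Int) - 1).toNat = k - 1 := by omega
      simp [h1, h2, h]
  have hnext : (if (k + 1) < ts.length then em.getD (k + 1) false else false) =
      decide (k + 1 < ts.length ∧ em.getD (k + 1) false = true) := by
    by_cases h : k + 1 < ts.length <;> simp [h]
  simp only [hlast, hnext, Bool.not_eq_true', decide_eq_false_iff_not]
  by_cases hc : em.getD k false = true
  · rw [if_pos hc, if_pos hc]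
  · rw [if_neg hc, if_neg hc]
    by_cases hj : k < ts.length
    · rw [pv_set_getD_self _ _ hj]
    · rw [List.set_eq_of_length_le (by omega)]

lemma pvA_fold (em : List Bool) :
    ∀ (c k : Nat) (ts : List String), k + c = ts.length →
      ((List.range' k c).foldl
        (fun ts i => token_transfer_by_emphasizes ts em i ((i : Int) - 1) (i + 1)) ts).length = ts.length ∧
      ∀ j, j < ts.length →
        ((List.range' k c).foldl
          (fun ts i => token_transfer_by_emphasizes ts em i ((i : Int) - 1) (i + 1)) ts).getD j "" =
        if j < k then ts.getD j "" else pvDecoA em ts.length j (ts.getD j "") := by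
  intro c
  induction c with
  | zero =>
    intro k ts hk
    rw [List.range'_zero, List.foldl_nil]
    refine ⟨rfl, fun j hj => ?_⟩
    rw [if_pos (by omega)]
  | succ c ih =>
    intro k ts hk
    rw [List.range'_succ, List.foldl_cons, pvA_step em ts k]
    set ts' := ts.set k (pvDecoA em ts.length k (ts.getD k "")) with hts'
    have hlen : ts'.length = ts.length := by simp [hts']
    obtain ⟨ihlen, ihval⟩ := ih (k + 1) ts' (by rw [hlen]; omega)
    refine ⟨by rw [ihlen, hlen], fun j hj => ?_⟩
    rw [ihval j (by rw [hlen]; exact hj)]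
    by_cases hjk : j < k
    · rw [if_pos (by omega), if_pos hjk, hts', pv_getD_set _ _ _ _ hj, if_neg (by omega)]
    · by_cases hje : j = k
      · subst hje
        rw [if_pos (by omega), if_neg (by omega), hts', pv_getD_set _ _ _ _ hj, if_pos rfl]
      · rw [if_neg (by omega), if_neg (by omega), hlen]
        have hgd : ts'.getD j "" = ts.getD j "" := by
          rw [hts', pv_getD_set _ _ _ _ hj, if_neg (by omega)]
        rw [hgd]

lemma pvScan_acc (em : List Bool) :
    ∀ (c k : Nat) (sp : List (Nat × Nat)) (st : Option Nat),
      (List.range' k c).foldl (pvScanStep em) (sp, st) =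
        (sp ++ ((List.range' k c).foldl (pvScanStep em) ([], st)).1,
         ((List.range' k c).foldl (pvScanStep em) ([], st)).2) := by
  intro c
  induction c with
  | zero => intro k sp st; simp
  | succ c ih =>
    intro k sp st
    rw [List.range'_succ]
    simp only [List.foldl_cons]
    have hstep : pvScanStep em (sp, st) k =
        (sp ++ (pvScanStep em ([], st) k).1, (pvScanStep em ([], st) k).2) := by
      rcases st with _ | s <;> cases hb : em.getD k false <;> simp only [pvScanStep, hb] <;> simp
    rw [hstep]
    rw [show pvScanStep em ([], st) k =
      ((pvScanStep em ([], st) k).1, (pvScanStep em ([], st) k).2) from rfl]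
    rw [ih (k + 1) (sp ++ (pvScanStep em ([], st) k).1) (pvScanStep em ([], st) k).2,
        ih (k + 1) (pvScanStep em ([], st) k).1 (pvScanStep em ([], st) k).2]
    simp [List.append_assoc]

-- span table for scanning positions k..k+c-1 from state st, including the final closure at n-1
def pvClosed (em : List Bool) (n c k : Nat) (st : Option Nat) : List (Nat × Nat) :=
  match ((List.range' k c).foldl (pvScanStep em) ([], st)).2 with
  | some s => ((List.range' k c).foldl (pvScanStep em) ([], st)).1 ++ [(s, n - 1)]
  | none => ((List.range' k c).foldl (pvScanStep em) ([], st)).1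

lemma pvClosed_step (em : List Bool) (n c k : Nat) (st : Option Nat) :
    pvClosed em n (c + 1) k st =
      (pvScanStep em ([], st) k).1 ++ pvClosed em n c (k + 1) (pvScanStep em ([], st) k).2 := by
  unfold pvClosed
  rw [List.range'_succ]
  simp only [List.foldl_cons]
  rw [show pvScanStep em ([], st) k =
    ((pvScanStep em ([], st) k).1, (pvScanStep em ([], st) k).2) from rfl]
  rw [pvScan_acc em c (k + 1) (pvScanStep em ([], st) k).1 (pvScanStep em ([], st) k).2]
  rcases hX : (List.range' (k + 1) c).foldl (pvScanStep em) ([], (pvScanStep em ([], st) k).2)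
    with ⟨sp2, st2⟩
  cases st2 <;> simp [List.append_assoc]

lemma pvVal_open (em : List Bool) (n k : Nat) (out : List String) (j : Nat)
    (hkn : k < n) (hb : em.getD k false = true) :
    pvVal em n (k + 1) (some k) out j = pvVal em n k none out j := by
  unfold pvVal
  rcases lt_trichotomy j k with h | h | h
  · rw [if_pos (show j < k + 1 from by omega), if_pos (show j < k from h)]
    split_ifs <;> simp_all <;> omega
  · subst h
    rw [if_pos (show j < j + 1 from by omega), if_neg (show ¬ j < j from by omega), if_pos hb]
    split_ifs <;> simp_all <;> omega
  · rw [if_neg (show ¬ j < k + 1 from by omega), if_neg (show ¬ j < k from by omega)]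
    by_cases he : em.getD j false = true
    · rw [if_pos he, if_pos he]
      by_cases hj1 : j = k + 1
      · subst hj1
        split_ifs <;> simp_all
      · split_ifs <;> simp_all <;> omega
    · rw [if_neg he, if_neg he]

lemma pvVal_cont (em : List Bool) (n k s : Nat) (out : List String) (j : Nat)
    (hs : s < k) (hkn : k < n) (hb : em.getD k false = true) :
    pvVal em n (k + 1) (some s) out j = pvVal em n k (some s) out j := by
  unfold pvVal
  rcases lt_trichotomy j k with h | h | h
  · rw [if_pos (show j < k + 1 from by omega), if_pos (show j < k from h)]
    split_ifs <;> simp_all <;> omega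
  · subst h
    rw [if_pos (show j < j + 1 from by omega), if_neg (show ¬ j < j from by omega), if_pos hb]
    split_ifs <;> simp_all <;> omega
  · rw [if_neg (show ¬ j < k + 1 from by omega), if_neg (show ¬ j < k from by omega)]
    by_cases he : em.getD j false = true
    · rw [if_pos he, if_pos he]
      by_cases hj1 : j = k + 1
      · subst hj1
        split_ifs <;> simp_all
      · split_ifs <;> simp_all <;> omega
    · rw [if_neg he, if_neg he]

lemma pvVal_skip (em : List Bool) (n k : Nat) (out : List String) (j : Nat)
    (hkn : k < n) (hb : em.getD k false = false) :
    pvVal em n (k + 1) none out j = pvVal em n k none out j := by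
  unfold pvVal
  rcases lt_trichotomy j k with h | h | h
  · rw [if_pos (show j < k + 1 from by omega), if_pos (show j < k from h)]
    split_ifs <;> simp_all
  · subst h
    rw [if_pos (show j < j + 1 from by omega), if_neg (show ¬ j < j from by omega),
      if_neg (show ¬ em.getD j false = true from by simpa using hb)]
    split_ifs <;> simp_all
  · rw [if_neg (show ¬ j < k + 1 from by omega), if_neg (show ¬ j < k from by omega)]
    by_cases he : em.getD j false = true
    · rw [if_pos he, if_pos he]
      by_cases hj1 : j = k + 1
      · subst hj1
        split_ifs <;> simp_all
      · split_ifs <;> simp_all <;> omega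
    · rw [if_neg he, if_neg he]

lemma pvDecStep_getD (out : List String) (s e : Nat) (j : Nat)
    (hs : s < out.length) (he : e < out.length) (hj : j < out.length) :
    (pvDecStep out (s, e)).getD j "" =
      if e = j then
        (if s = e then "【" ++ out.getD s "" else out.getD e "") ++ "】"
      else if s = j then "【" ++ out.getD s "" else out.getD j "" := by
  unfold pvDecStep
  rw [pv_getD_set _ _ _ _ (by simpa using hj), pv_getD_set _ _ _ _ (by simpa using he),
    pv_getD_set _ _ _ _ hj]

lemma pvVal_close (em : List Bool) (n k s : Nat) (out : List String) (j : Nat)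
    (hs : s < k) (hkn : k < n) (hb : em.getD k false = false)
    (hlen : n = out.length) (hj : j < out.length) :
    pvVal em n (k + 1) none (pvDecStep out (s, k - 1)) j = pvVal em n k (some s) out j := by
  have hgd := pvDecStep_getD out s (k - 1) j (by omega) (by omega) hj
  unfold pvVal
  rw [hgd]
  rcases lt_trichotomy j k with h | h | h
  · rw [if_pos (show j < k + 1 from by omega), if_pos (show j < k from h)]
    split_ifs <;> simp_all <;> omega
  · subst h
    rw [if_pos (show j < j + 1 from by omega), if_neg (show ¬ j < j from by omega),
      if_neg (show ¬ em.getD j false = true from by simpa using hb),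
      if_neg (show ¬ (j - 1 = j) from by omega), if_neg (show ¬ (s = j) from by omega)]
    simp
  · rw [if_neg (show ¬ j < k + 1 from by omega), if_neg (show ¬ j < k from by omega),
      if_neg (show ¬ (k - 1 = j) from by omega), if_neg (show ¬ (s = j) from by omega)]
    by_cases he : em.getD j false = true
    · rw [if_pos he, if_pos he]
      by_cases hj1 : j = k + 1
      · subst hj1
        split_ifs <;> simp_all
      · split_ifs <;> simp_all <;> omega
    · rw [if_neg he, if_neg he]

lemma pvB_main (em : List Bool) :
    ∀ (c k : Nat) (st : Option Nat) (out : List String),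
      (∀ s, st = some s → s < k) → k + c = out.length →
      ((pvClosed em (k + c) c k st).foldl pvDecStep out).length = out.length ∧
      ∀ j, j < out.length →
        ((pvClosed em (k + c) c k st).foldl pvDecStep out).getD j "" = pvVal em (k + c) k st out j := by
  intro c
  induction c with
  | zero =>
    intro k st out hst hk
    rcases st with _ | s
    · have hcl : pvClosed em (k + 0) 0 k none = [] := by simp [pvClosed]
      rw [hcl, List.foldl_nil]
      refine ⟨rfl, fun j hj => ?_⟩
      unfold pvVal
      rw [if_pos (show j < k from by omega)]
      simp
    · have hs := hst s rfl
      have hcl : pvClosed em (k + 0) 0 k (some s) = [(s, k + 0 - 1)] := by simp [pvClosed]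
      rw [hcl]
      simp only [List.foldl_cons, List.foldl_nil]
      refine ⟨by simp [pvDecStep], fun j hj => ?_⟩
      have hgd := pvDecStep_getD out s (k + 0 - 1) j (by omega) (by omega) hj
      rw [hgd]
      unfold pvVal
      rw [if_pos (show j < k from by omega)]
      split_ifs <;> simp_all <;> omega
  | succ c ih =>
    intro k st out hst hk
    have hkn : k < k + (c + 1) := by omega
    rw [pvClosed_step em (k + (c + 1)) c k st]
    rw [List.foldl_append]
    rcases st with _ | s <;> cases hb : em.getD k false
    -- st = none, em k = false : skip
    · have hstep : pvScanStep em ([], (none : Option Nat)) k = ([], none) := by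
        simp only [pvScanStep]; rw [hb]; simp
      rw [hstep]
      simp only [List.foldl_nil]
      obtain ⟨ihlen, ihval⟩ := ih (k + 1) none out (by simp) (by omega)
      rw [show (k + 1) + c = k + (c + 1) by omega] at ihlen ihval
      refine ⟨ihlen, fun j hj => ?_⟩
      rw [ihval j hj, pvVal_skip em _ k out j hkn hb]
    -- st = none, em k = true : open a run
    · have hstep : pvScanStep em ([], (none : Option Nat)) k = ([], some k) := by
        simp only [pvScanStep]; rw [hb]; simp
      rw [hstep]
      simp only [List.foldl_nil]
      obtain ⟨ihlen, ihval⟩ := ih (k + 1) (some k) out (by intro x hx; injection hx; omega) (by omega)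
      rw [show (k + 1) + c = k + (c + 1) by omega] at ihlen ihval
      refine ⟨ihlen, fun j hj => ?_⟩
      rw [ihval j hj, pvVal_open em _ k out j hkn hb]
    -- st = some s, em k = false : close the run
    · have hs := hst s rfl
      have hstep : pvScanStep em ([], some s) k = ([(s, k - 1)], none) := by
        simp only [pvScanStep]; rw [hb]; simp
      rw [hstep]
      simp only [List.foldl_cons, List.foldl_nil]
      have hlen' : (pvDecStep out (s, k - 1)).length = out.length := by simp [pvDecStep]
      obtain ⟨ihlen, ihval⟩ := ih (k + 1) none (pvDecStep out (s, k - 1)) (by simp) (by omega)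
      rw [show (k + 1) + c = k + (c + 1) by omega] at ihlen ihval
      rw [hlen'] at ihlen ihval
      refine ⟨ihlen, fun j hj => ?_⟩
      rw [ihval j hj, pvVal_close em _ k s out j hs hkn hb (by omega) hj]
    -- st = some s, em k = true : continue the run
    · have hs := hst s rfl
      have hstep : pvScanStep em ([], some s) k = ([], some s) := by
        simp only [pvScanStep]; rw [hb]; simp
      rw [hstep]
      simp only [List.foldl_nil]
      obtain ⟨ihlen, ihval⟩ := ih (k + 1) (some s) out (by intro x hx; injection hx; omega) (by omega)
      rw [show (k + 1) + c = k + (c + 1) by omega] at ihlen ihval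
      refine ⟨ihlen, fun j hj => ?_⟩
      rw [ihval j hj, pvVal_cont em _ k s out j hs hkn hb]

lemma pvVal_zero (em : List Bool) (n : Nat) (out : List String) (j : Nat) :
    pvVal em n 0 none out j = pvDecoA em n j (out.getD j "") := by
  unfold pvVal pvDecoA
  rw [if_neg (by omega)]
  rcases Nat.eq_zero_or_pos j with h | h
  · subst h; simp
  · have h0 : ¬ j = 0 := by omega
    simp [h0]

-- ===== VERDICT (by name: the statement is the Claim_ definition above) =====
theorem print_sentence_spec : Claim_equal_print_sentence := by
  intro tokens em _ _
  unfold Spec_print_sentence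
  simp only [print_sentence, print_sentence_alt, List.range_eq_range']
  have hA := pvA_fold em tokens.length 0 tokens (by omega)
  have hB := pvB_main em tokens.length 0 none tokens (by simp) (by omega)
  simp only [Nat.zero_add] at hA hB
  have hcl : (match ((List.range' 0 tokens.length).foldl (pvScanStep em) ([], (none : Option Nat))).2 with
      | some s => ((List.range' 0 tokens.length).foldl (pvScanStep em) ([], (none : Option Nat))).1 ++ [(s, tokens.length - 1)]
      | none => ((List.range' 0 tokens.length).foldl (pvScanStep em) ([], (none : Option Nat))).1) = pvClosed em tokens.length tokens.length 0 none := rfl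
  congr 1
  apply List.ext_getElem (by rw [hA.1]; rw [hcl]; rw [hB.1])
  intro i h1 h2
  have hi : i < tokens.length := by rw [hA.1] at h1; exact h1
  rw [← List.getD_eq_getElem _ "" h1, ← List.getD_eq_getElem _ "" h2]
  rw [hA.2 i hi]
  rw [hcl, hB.2 i hi, pvVal_zero]
  rw [if_neg (by omega)]
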